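-- pv_equiv track=rewrite | github.com/pech2/advent-of-code | day03.py | find_two
-- ===== SOURCE A (Python) =====
-- def find_two(grid, row, col):
--     slices = set()
--     for x in range(-1, 2):
--         for y in range(-1, 2):
--             new_row = x + row
--             new_col = y + col
--             if (
--                 new_row < 0
--                 or new_row >= len(grid)
--                 or new_col < 0
--                 or new_col >= len(grid[0])
--                 or not grid[new_row][new_col].isdigit()
--             ):
--                 continue
--             left = right = new_col
--             while left - 1 >= 0 and grid[new_row][left - 1].isdigit():
--                 left -= 1
--             while right + 1 < len(grid[0]) and grid[new_row][right + 1].isdigit():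
--                 right += 1
--             slices.add((new_row, left, right))
--     if len(slices) == 2:
--         slice1 = slices.pop()
--         slice2 = slices.pop()
--         return int(grid[slice1[0]][slice1[1] : slice1[2] + 1]) * int(
--             grid[slice2[0]][slice2[1] : slice2[2] + 1]
--         )
--     return 0
-- ===== SOURCE B (Python) =====
-- def find_two(grid, row, col):
--     if not grid:
--         return 0
--     w = len(grid[0])
--     spans = []
--     for r in range(max(0, row - 1), min(len(grid), row + 2)):
--         spans += _digit_spans(grid[r][:w], col, r)
--     if len(spans) != 2:
--         return 0
--     product = 1
--     for r, l, e in spans: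
--         product *= int(grid[r][l:e + 1])
--     return product
--
-- def _digit_spans(line, col, r):
--     out = []
--     c = 0
--     n = len(line)
--     while c < n:
--         if line[c].isdigit():
--             l = c
--             while c + 1 < n and line[c + 1].isdigit():
--                 c += 1
--             if l <= col + 1 and col - 1 <= c:
--                 out.append((r, l, c))
--         c += 1
--     return out
-- ===== Notes on version B (the rewrite author's own statement) =====
-- stated objective: alternative
-- what changed: A probes each of the 9 neighbour cells, expands a digit run left and right from every digit hit and dedups the runs in a set; B instead scans each of the up-to-3 in-bounds rows (truncated to the grid width) once left-to-right, enumerating its maximal digit runs and keeping those whose span overlaps the column window col-1..col+1, then multiplies the parsed runs in one pass.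
import Mathlib
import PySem

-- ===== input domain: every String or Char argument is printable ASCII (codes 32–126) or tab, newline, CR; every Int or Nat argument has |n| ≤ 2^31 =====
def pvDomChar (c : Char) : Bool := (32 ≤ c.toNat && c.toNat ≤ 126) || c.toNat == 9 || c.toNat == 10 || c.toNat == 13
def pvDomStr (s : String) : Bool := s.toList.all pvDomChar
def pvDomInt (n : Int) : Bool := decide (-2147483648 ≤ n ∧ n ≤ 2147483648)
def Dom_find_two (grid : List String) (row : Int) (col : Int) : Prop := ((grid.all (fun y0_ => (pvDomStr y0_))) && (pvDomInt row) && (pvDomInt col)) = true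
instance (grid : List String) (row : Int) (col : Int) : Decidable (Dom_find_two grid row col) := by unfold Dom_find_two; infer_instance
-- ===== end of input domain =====

-- B replaces A's 3x3 neighbour probing (with per-cell left/right run expansion into a dedup set)
-- by one left-to-right scan of each in-bounds row that lists its maximal digit runs once and keeps
-- those overlapping the column window (objective: alternative decomposition, same exact result).
-- A's Python pops the two slices from a set in hash order; the result (a product of the two parsed
-- numbers) does not depend on that order, and the port reads them off in insertion order.

-- ===== PORT A =====
-- grid[r] (default "" is unreachable: A only fetches rows with 0 <= r < len(grid))
def rowS (grid : List String) (r : Int) : List Char := ((PySem.List.pyGet? grid r).getD "").toList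
-- s[c].isdigit() with an out-of-range read mapped to false (A only tests indices 0 <= c < len(s))
def digC (s : List Char) (c : Int) : Bool := (PySem.List.pyGet? s c).elim false PySem.Chars.isdigit
-- int(grid[t.0][t.1 : t.2 + 1])  (the run is a nonempty digit string, so int() succeeds; getD 0 unreachable)
def intVal (grid : List String) (t : Int × Int × Int) : Int :=
  (PySem.Int.ofChars? (PySem.List.slice (rowS grid t.1) (some t.2.1) (some (t.2.2 + 1)))).getD 0
-- 'while right + 1 < w and s[right+1].isdigit(): right += 1'  (fuel (w - right).toNat bounds the loop)
def expandR (s : List Char) (w : Int) : Nat → Int → Int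
  | 0, right => right
  | f + 1, right => if right + 1 < w ∧ digC s (right + 1) = true then expandR s w f (right + 1) else right

-- 'while left - 1 >= 0 and s[left-1].isdigit(): left -= 1'  (fuel left.toNat bounds the loop)
def expandL (s : List Char) : Nat → Int → Int
  | 0, left => left
  | f + 1, left => if 0 ≤ left - 1 ∧ digC s (left - 1) = true then expandL s f (left - 1) else left

-- one body of A's double loop, for the cell (x + row, y + col)
def cellStep (grid : List String) (row col w n : Int) (s : PySem.Set (Int × Int × Int)) (x y : Int) :
    PySem.Set (Int × Int × Int) :=
  let nr := x + row
  let nc := y + col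
  if nr < 0 ∨ n ≤ nr ∨ nc < 0 ∨ w ≤ nc ∨ ¬ digC (rowS grid nr) nc = true then s
  else PySem.Set.add s (nr, expandL (rowS grid nr) nc.toNat nc, expandR (rowS grid nr) w (w - nc).toNat nc)

def find_two (grid : List String) (row : Int) (col : Int) : Int :=
  let n : Int := grid.length
  let w : Int := (grid.headD "").toList.length
  let slices : PySem.Set (Int × Int × Int) :=
    (PySem.List.pyRange (-1) 2 1).foldl
      (fun s x => (PySem.List.pyRange (-1) 2 1).foldl (fun s y => cellStep grid row col w n s x y) s)
      PySem.Set.empty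
  if PySem.Set.len slices = 2 then
    match slices with
    | t1 :: t2 :: _ => intVal grid t1 * intVal grid t2
    | _ => 0
  else 0

-- ===== PORT B =====
-- B's own primitives (B evaluates the same Python expressions: grid[r], s[c].isdigit(), int(...))
def rowB (grid : List String) (r : Int) : List Char := ((PySem.List.pyGet? grid r).getD "").toList
def digB (s : List Char) (c : Int) : Bool := (PySem.List.pyGet? s c).elim false PySem.Chars.isdigit
def intValB (grid : List String) (t : Int × Int × Int) : Int :=
  (PySem.Int.ofChars? (PySem.List.slice (rowB grid t.1) (some t.2.1) (some (t.2.2 + 1)))).getD 0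
-- B's inner 'while c + 1 < w and line[c+1].isdigit(): c += 1'  (fuel bounds the loop)
def extendB (s : List Char) (w : Int) : Nat → Int → Int
  | 0, c => c
  | f + 1, c => if c + 1 < w ∧ digB s (c + 1) = true then extendB s w f (c + 1) else c

-- _digit_spans: scan line once; at each digit start the maximal run, keep it if it meets the window
def scanRow (s : List Char) (w col r : Int) : Nat → Int → List (Int × Int × Int)
  | 0, _ => []
  | f + 1, c =>
    if c < w then
      if digB s c = true then
        let e := extendB s w (w - c).toNat c
        let rest := scanRow s w col r f (e + 1)
        if c ≤ col + 1 ∧ col - 1 ≤ e then (r, c, e) :: rest else rest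
      else scanRow s w col r f (c + 1)
    else []

def find_two_alt (grid : List String) (row : Int) (col : Int) : Int :=
  if grid = [] then 0
  else
    let w : Int := (grid.headD "").toList.length
    let spans : List (Int × Int × Int) :=
      (PySem.List.pyRange (max 0 (row - 1)) (min (grid.length : Int) (row + 2)) 1).foldl
        (fun acc r =>
          let line := PySem.List.slice (rowB grid r) none (some w)
          acc ++ scanRow line (line.length : Int) col r (line.length + 1) 0) []
    if spans.length = 2 then
      spans.foldl (fun product t => product * intValB grid t) 1
    else 0

-- ===== PRECONDITION & SPEC =====
-- Pre_ excludes exactly the inputs on which A raises IndexError: a probed cell of the 3x3 window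
-- that falls beyond its (shorter-than-grid[0]) row, or a probed digit whose run runs off the end of
-- such a short row; everywhere else A returns, and B returns everywhere.
def Pre_find_two (grid : List String) (row : Int) (col : Int) : Prop :=
  ∀ k ∈ List.range grid.length, row - 1 ≤ (k : Int) → (k : Int) ≤ row + 1 →
    ∀ c ∈ [col - 1, col, col + 1], 0 ≤ c → c < ((grid.headD "").toList.length : Int) →
      c < (((grid[k]?.getD "").toList.length : Nat) : Int) ∧
      ((((grid[k]?.getD "").toList.length : Nat) : Int) < ((grid.headD "").toList.length : Int) →
        ((grid[k]?.getD "").toList.drop c.toNat).all PySem.Chars.isdigit = false)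
instance (grid : List String) (row : Int) (col : Int) : Decidable (Pre_find_two grid row col) := by
  unfold Pre_find_two; infer_instance
def pvWitness_find_two : List String × Int × Int := (["12*", ".3."], 0, 1)
def Spec_find_two (grid : List String) (row : Int) (col : Int) (out : Int) : Prop := out = find_two_alt grid row col
instance (grid : List String) (row : Int) (col : Int) (out : Int) : Decidable (Spec_find_two grid row col out) := by unfold Spec_find_two; infer_instance

-- ===== CLAIM (what is proved, stated in full; the proofs are below) =====
def Claim_equal_find_two : Prop := ∀ (grid : List String) (row : Int) (col : Int), Dom_find_two grid row col → Pre_find_two grid row col → Spec_find_two grid row col (find_two grid row col)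

-- ===== LEMMAS AND PROOFS =====

-- a maximal digit run [l, e] of the row s, relative to the width w
def IsRun (s : List Char) (w l e : Int) : Prop :=
  0 ≤ l ∧ l ≤ e ∧ e < w ∧ (∀ i, l ≤ i → i ≤ e → digC s i = true) ∧
    (l = 0 ∨ digC s (l - 1) = false) ∧ (e = w - 1 ∨ digC s (e + 1) = false)

-- row r truncated to the width of row 0 — the characters either program can reach there
def rowT (grid : List String) (r : Int) : List Char :=
  (rowS grid r).take (grid.headD "").toList.length

-- the spans both programs select: runs of a truncated row within row±1 that meet the column window
def Sel (grid : List String) (row col : Int) (t : Int × Int × Int) : Prop :=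
  ∃ r l e, t = (r, l, e) ∧ 0 ≤ r ∧ r < (grid.length : Int) ∧ row - 1 ≤ r ∧ r ≤ row + 1 ∧
    IsRun (rowT grid r) ((rowT grid r).length : Int) l e ∧ l ≤ col + 1 ∧ col - 1 ≤ e

theorem lineB_eq (grid : List String) (r : Int) :
    PySem.List.slice (rowB grid r) none (some ((grid.headD "").toList.length : Int)) = rowT grid r := by
  rw [PySem.List.slice_to _ (Int.natCast_nonneg _)]
  simp [rowT, rowB, rowS]

-- B's digit test and inner while are definitionally A's (the two Pythons evaluate the same expressions)
theorem digB_eq : @digB = @digC := rfl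
theorem extendB_eq : @extendB = @expandR := by
  funext s w f
  induction f with
  | zero => rfl
  | succ f ih =>
    funext c
    show extendB s w (f + 1) c = expandR s w (f + 1) c
    simp only [extendB, expandR, digB_eq]
    rw [ih]; rfl
theorem digC_false_of_ge (s : List Char) (c : Int) (hc : (s.length : Int) ≤ c) (h0 : 0 ≤ c) :
    digC s c = false := by
  have hcc : c = ((c.toNat : Nat) : Int) := by omega
  rw [hcc]
  simp only [digC, PySem.List.pyGet?_natCast]
  rw [List.getElem?_eq_none (by omega)]
  rfl

theorem digC_lt (s : List Char) (c : Int) (hc : 0 ≤ c) (h : digC s c = true) : c < (s.length : Int) := by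
  by_contra hlt
  rw [digC_false_of_ge s c (by omega) hc] at h
  exact Bool.false_ne_true h

theorem digC_take (s : List Char) (k : Nat) (c : Int) (h0 : 0 ≤ c)
    (hlt : c < ((s.take k).length : Int)) : digC (s.take k) c = digC s c := by
  have hc : c = ((c.toNat : Nat) : Int) := by omega
  have hk : c.toNat < (s.take k).length := by omega
  rw [hc]
  simp only [digC, PySem.List.pyGet?_natCast, List.getElem?_take]
  rw [if_pos (by simp [List.length_take] at hk; omega)]

theorem expandR_take (s : List Char) (k : Nat) :
    ∀ (f : Nat) (c : Int), 0 ≤ c →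
      expandR s (k : Int) f c = expandR (s.take k) ((s.take k).length : Int) f c := by
  have hm : ((s.take k).length : Int) = min (k : Int) (s.length : Int) := by
    rw [List.length_take]; exact_mod_cast Nat.cast_min k s.length
  intro f
  induction f with
  | zero => intro c _; rfl
  | succ f ih =>
    intro c h0
    simp only [expandR]
    by_cases hcond : c + 1 < (k : Int) ∧ digC s (c + 1) = true
    · have hlt : c + 1 < ((s.take k).length : Int) := by
        have := digC_lt s (c + 1) (by omega) hcond.2
        omega
      rw [if_pos hcond, if_pos ⟨hlt, by rw [digC_take s k (c + 1) (by omega) hlt]; exact hcond.2⟩]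
      exact ih (c + 1) (by omega)
    · rw [if_neg hcond, if_neg ?_]
      intro ⟨h1, h2⟩
      rw [digC_take s k (c + 1) (by omega) h1] at h2
      exact hcond ⟨by omega, h2⟩

theorem expandL_take (s : List Char) (k : Nat) :
    ∀ (f : Nat) (c : Int), 0 ≤ c → c < ((s.take k).length : Int) →
      expandL s f c = expandL (s.take k) f c := by
  intro f
  induction f with
  | zero => intro c _ _; rfl
  | succ f ih =>
    intro c h0 hc
    simp only [expandL]
    by_cases hcond : 0 ≤ c - 1 ∧ digC s (c - 1) = true
    · rw [if_pos hcond, if_pos ⟨hcond.1, by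
        rw [digC_take s k (c - 1) hcond.1 (by omega)]; exact hcond.2⟩]
      exact ih (c - 1) hcond.1 (by omega)
    · rw [if_neg hcond, if_neg ?_]
      intro ⟨h1, h2⟩
      rw [digC_take s k (c - 1) h1 (by omega)] at h2
      exact hcond ⟨h1, h2⟩

theorem expandR_spec (s : List Char) (w : Int) (hw : w = (s.length : Int)) :
    ∀ (f : Nat) (c : Int), 0 ≤ c → digC s c = true → (w - 1 - c).toNat ≤ f →
      c ≤ expandR s w f c ∧ expandR s w f c < w ∧
      (∀ i, c ≤ i → i ≤ expandR s w f c → digC s i = true) ∧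
      (expandR s w f c = w - 1 ∨ digC s (expandR s w f c + 1) = false) := by
  intro f
  induction f with
  | zero =>
    intro c h0 hd hf
    simp only [expandR]
    have hcw : c < w := by rw [hw]; exact digC_lt s c h0 hd
    refine ⟨le_refl c, hcw, ?_, Or.inl (by omega)⟩
    intro i h1 h2
    have : i = c := by omega
    rw [this]; exact hd
  | succ f ih =>
    intro c h0 hd hf
    simp only [expandR]
    by_cases hcond : c + 1 < w ∧ digC s (c + 1) = true
    · rw [if_pos hcond]
      have hI := ih (c + 1) (by omega) hcond.2 (by omega)
      refine ⟨by omega, hI.2.1, ?_, hI.2.2.2⟩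
      intro i h1 h2
      by_cases hic : i = c
      · rw [hic]; exact hd
      · exact hI.2.2.1 i (by omega) h2
    · rw [if_neg hcond]
      have hcw : c < w := by rw [hw]; exact digC_lt s c h0 hd
      refine ⟨le_refl c, hcw, ?_, ?_⟩
      · intro i h1 h2
        have : i = c := by omega
        rw [this]; exact hd
      · rcases Decidable.not_and_iff_or_not.mp hcond with h | h
        · exact Or.inl (by omega)
        · exact Or.inr (by simpa using h)

theorem expandL_spec (s : List Char) :
    ∀ (f : Nat) (c : Int), 0 ≤ c → digC s c = true → c.toNat ≤ f →
      0 ≤ expandL s f c ∧ expandL s f c ≤ c ∧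
      (∀ i, expandL s f c ≤ i → i ≤ c → digC s i = true) ∧
      (expandL s f c = 0 ∨ digC s (expandL s f c - 1) = false) := by
  intro f
  induction f with
  | zero =>
    intro c h0 hd hf
    have hc0 : c = 0 := by omega
    simp only [expandL]
    refine ⟨by omega, le_refl c, ?_, Or.inl hc0⟩
    intro i h1 h2
    have : i = c := by omega
    rw [this]; exact hd
  | succ f ih =>
    intro c h0 hd hf
    simp only [expandL]
    by_cases hcond : 0 ≤ c - 1 ∧ digC s (c - 1) = true
    · rw [if_pos hcond]
      have hI := ih (c - 1) hcond.1 hcond.2 (by omega)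
      refine ⟨hI.1, by omega, ?_, hI.2.2.2⟩
      intro i h1 h2
      by_cases hic : i = c
      · rw [hic]; exact hd
      · exact hI.2.2.1 i h1 (by omega)
    · rw [if_neg hcond]
      refine ⟨h0, le_refl c, ?_, ?_⟩
      · intro i h1 h2
        have : i = c := by omega
        rw [this]; exact hd
      · rcases Decidable.not_and_iff_or_not.mp hcond with h | h
        · exact Or.inl (by omega)
        · exact Or.inr (by simpa using h)

theorem run_unique (s : List Char) (w l e l' e' i : Int) (h : IsRun s w l e) (h' : IsRun s w l' e')
    (hi1 : l ≤ i) (hi2 : i ≤ e) (hi3 : l' ≤ i) (hi4 : i ≤ e') : l = l' ∧ e = e' := by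
  obtain ⟨hl0, hle, hew, hdig, hstart, hend⟩ := h
  obtain ⟨hl0', hle', hew', hdig', hstart', hend'⟩ := h'
  constructor
  · by_contra hne
    rcases lt_or_gt_of_ne hne with hlt | hgt
    · have hd : digC s (l' - 1) = true := hdig (l' - 1) (by omega) (by omega)
      rcases hstart' with h | h
      · omega
      · rw [h] at hd; exact Bool.false_ne_true hd
    · have hd : digC s (l - 1) = true := hdig' (l - 1) (by omega) (by omega)
      rcases hstart with h | h
      · omega
      · rw [h] at hd; exact Bool.false_ne_true hd
  · by_contra hne
    rcases lt_or_gt_of_ne hne with hlt | hgt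
    · have hd : digC s (e + 1) = true := hdig' (e + 1) (by omega) (by omega)
      rcases hend with h | h
      · omega
      · rw [h] at hd; exact Bool.false_ne_true hd
    · have hd : digC s (e' + 1) = true := hdig (e' + 1) (by omega) (by omega)
      rcases hend' with h | h
      · omega
      · rw [h] at hd; exact Bool.false_ne_true hd

theorem expandR_ge (s : List Char) (w : Int) : ∀ (f : Nat) (c : Int), c ≤ expandR s w f c := by
  intro f
  induction f with
  | zero => intro c; simp [expandR]
  | succ f ih =>
    intro c
    simp only [expandR]
    split
    · exact le_trans (by omega) (ih (c + 1))
    · exact le_refl c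

theorem scanRow_fst (s : List Char) (w col r : Int) :
    ∀ (f : Nat) (c : Int) (t : Int × Int × Int), t ∈ scanRow s w col r f c → t.1 = r := by
  intro f
  induction f with
  | zero => intro c t ht; simp [scanRow] at ht
  | succ f ih =>
    intro c t ht
    simp only [scanRow, digB_eq, extendB_eq] at ht
    split_ifs at ht with h1 h2 h3
    · rcases List.mem_cons.mp ht with rfl | ht
      · rfl
      · exact ih _ t ht
    · exact ih _ t ht
    · exact ih _ t ht
    · simp at ht

theorem scanRow_l_ge (s : List Char) (w col r : Int) :
    ∀ (f : Nat) (c : Int) (t : Int × Int × Int), t ∈ scanRow s w col r f c → c ≤ t.2.1 := by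
  intro f
  induction f with
  | zero => intro c t ht; simp [scanRow] at ht
  | succ f ih =>
    intro c t ht
    simp only [scanRow, digB_eq, extendB_eq] at ht
    split_ifs at ht with h1 h2 h3
    · rcases List.mem_cons.mp ht with rfl | ht
      · exact le_refl c
      · have hg := expandR_ge s w (w - c).toNat c
        have hl := ih (expandR s w (w - c).toNat c + 1) t ht
        omega
    · have hg := expandR_ge s w (w - c).toNat c
      have hl := ih (expandR s w (w - c).toNat c + 1) t ht
      omega
    · have hl := ih (c + 1) t ht
      omega
    · simp at ht

theorem scanRow_pairwise (s : List Char) (w col r : Int) (f : Nat) (c : Int) :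
    (scanRow s w col r f c).Pairwise (fun a b => a.2.1 < b.2.1) := by
  induction f generalizing c with
  | zero => simp [scanRow]
  | succ f ih =>
    simp only [scanRow, digB_eq, extendB_eq]
    split_ifs with h1 h2 h3
    · refine List.pairwise_cons.mpr ⟨?_, ih _⟩
      intro b hb
      show c < b.2.1
      have hg := expandR_ge s w (w - c).toNat c
      have hl := scanRow_l_ge s w col r f (expandR s w (w - c).toNat c + 1) b hb
      omega
    · exact ih _
    · exact ih _
    · exact List.Pairwise.nil

theorem scanRow_mem (s : List Char) (w col r : Int) (hw : w = (s.length : Int)) :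
    ∀ (f : Nat) (c : Int), (w - c).toNat ≤ f → 0 ≤ c →
      (digC s c = true → c = 0 ∨ digC s (c - 1) = false) →
      ∀ t, t ∈ scanRow s w col r f c ↔
        ∃ l e, t = (r, l, e) ∧ IsRun s w l e ∧ c ≤ l ∧ l ≤ col + 1 ∧ col - 1 ≤ e := by
  intro f
  induction f with
  | zero =>
    intro c hf h0 H t
    simp only [scanRow, List.not_mem_nil, false_iff]
    rintro ⟨l, e, -, ⟨hl0, hle, hew, -, -, -⟩, hcl, -, -⟩
    omega
  | succ f ih =>
    intro c hf h0 H t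
    simp only [scanRow, digB_eq, extendB_eq]
    by_cases hcw : c < w
    · rw [if_pos hcw]
      by_cases hd : digC s c = true
      · rw [if_pos hd]
        have hR := expandR_spec s w hw (w - c).toNat c h0 hd (by omega)
        set e := expandR s w (w - c).toNat c with he
        have hrunce : IsRun s w c e := ⟨h0, hR.1, hR.2.1, hR.2.2.1, H hd, hR.2.2.2⟩
        have hH' : digC s (e + 1) = true → e + 1 = 0 ∨ digC s (e + 1 - 1) = false := by
          intro hdig
          exfalso
          rcases hR.2.2.2 with hb | hb
          · rw [hb] at hdig
            have : digC s (w - 1 + 1) = false := by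
              apply digC_false_of_ge <;> omega
            rw [this] at hdig; exact Bool.false_ne_true hdig
          · rw [hb] at hdig; exact Bool.false_ne_true hdig
        have hrest := ih (e + 1) (by omega) (by omega) hH'
        by_cases hsel : c ≤ col + 1 ∧ col - 1 ≤ e
        · rw [if_pos hsel]
          constructor
          · intro ht
            rcases List.mem_cons.mp ht with rfl | ht
            · exact ⟨c, e, rfl, hrunce, le_refl c, hsel.1, hsel.2⟩
            · obtain ⟨l, e', rfl, hr, hcl, h1, h2⟩ := (hrest _).mp ht
              exact ⟨l, e', rfl, hr, by omega, h1, h2⟩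
          · rintro ⟨l, e', rfl, hr, hcl, h1, h2⟩
            by_cases hle' : l ≤ e
            · obtain ⟨h3, h4⟩ :=
                run_unique s w c e l e' l hrunce hr hcl hle' (le_refl l) hr.2.1
              rw [← h3, ← h4]
              exact List.mem_cons_self
            · refine List.mem_cons_of_mem _ ((hrest _).mpr ⟨l, e', rfl, hr, by omega, h1, h2⟩)
        · rw [if_neg hsel]
          constructor
          · intro ht
            obtain ⟨l, e', rfl, hr, hcl, h1, h2⟩ := (hrest _).mp ht
            exact ⟨l, e', rfl, hr, by omega, h1, h2⟩
          · rintro ⟨l, e', rfl, hr, hcl, h1, h2⟩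
            by_cases hle' : l ≤ e
            · obtain ⟨h3, h4⟩ :=
                run_unique s w c e l e' l hrunce hr hcl hle' (le_refl l) hr.2.1
              exact absurd ⟨by omega, by omega⟩ hsel
            · exact (hrest _).mpr ⟨l, e', rfl, hr, by omega, h1, h2⟩
      · rw [if_neg hd]
        have hH' : digC s (c + 1) = true → c + 1 = 0 ∨ digC s (c + 1 - 1) = false := by
          intro
          right
          simpa using hd
        rw [ih (c + 1) (by omega) (by omega) hH' t]
        constructor
        · rintro ⟨l, e, rfl, hr, hcl, h1, h2⟩
          exact ⟨l, e, rfl, hr, by omega, h1, h2⟩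
        · rintro ⟨l, e, rfl, hr, hcl, h1, h2⟩
          have hlc : l ≠ c := by
            intro hlc
            apply hd
            rw [← hlc]
            exact hr.2.2.2.1 l (le_refl l) hr.2.1
          exact ⟨l, e, rfl, hr, by omega, h1, h2⟩
    · rw [if_neg hcw]
      simp only [List.not_mem_nil, false_iff]
      rintro ⟨l, e, -, ⟨hl0, hle, hew, -, -, -⟩, hcl, -, -⟩
      omega

-- the contribution of A's cell (x + row, y + col): in bounds, a digit, and t is its expanded run
def CellP (grid : List String) (row col w n x y : Int) (t : Int × Int × Int) : Prop :=
  0 ≤ x + row ∧ x + row < n ∧ 0 ≤ y + col ∧ y + col < w ∧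
    digC (rowS grid (x + row)) (y + col) = true ∧
    t = (x + row, expandL (rowS grid (x + row)) (y + col).toNat (y + col),
          expandR (rowS grid (x + row)) w (w - (y + col)).toNat (y + col))

theorem mem_cellStep (grid : List String) (row col w n : Int) (s : PySem.Set (Int × Int × Int))
    (x y : Int) (t : Int × Int × Int) :
    t ∈ cellStep grid row col w n s x y ↔ t ∈ s ∨ CellP grid row col w n x y t := by
  simp only [cellStep, CellP]
  split_ifs with hg
  · constructor
    · exact Or.inl
    · rintro (h | ⟨h1, h2, h3, h4, h5, rfl⟩)
      · exact h
      · exact absurd hg (by push Not; exact ⟨by omega, by omega, by omega, by omega, h5⟩)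
  · rw [PySem.Set.mem_add]
    push Not at hg
    constructor
    · rintro (h | h)
      · exact Or.inl h
      · exact Or.inr ⟨by omega, by omega, by omega, by omega, by simpa using hg.2.2.2.2, h⟩
    · rintro (h | ⟨-, -, -, -, -, h⟩)
      · exact Or.inl h
      · exact Or.inr h

theorem nodup_cellStep (grid : List String) (row col w n : Int) (s : PySem.Set (Int × Int × Int))
    (x y : Int) (h : s.Nodup) : (cellStep grid row col w n s x y).Nodup := by
  simp only [cellStep]
  split_ifs
  · exact h
  · exact PySem.Set.nodup_add _ _ h

theorem mem_foldl_inner (grid : List String) (row col w n x : Int) :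
    ∀ (ys : List Int) (s : PySem.Set (Int × Int × Int)) (t : Int × Int × Int),
      t ∈ ys.foldl (fun s y => cellStep grid row col w n s x y) s ↔
        t ∈ s ∨ ∃ y ∈ ys, CellP grid row col w n x y t := by
  intro ys
  induction ys with
  | nil => intro s t; simp
  | cons y ys ih =>
    intro s t
    simp only [List.foldl_cons]
    rw [ih, mem_cellStep]
    simp only [List.mem_cons, exists_eq_or_imp]
    tauto

theorem mem_foldl_outer (grid : List String) (row col w n : Int) :
    ∀ (xs : List Int) (s : PySem.Set (Int × Int × Int)) (t : Int × Int × Int),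
      t ∈ xs.foldl (fun s x => (PySem.List.pyRange (-1) 2 1).foldl
            (fun s y => cellStep grid row col w n s x y) s) s ↔
        t ∈ s ∨ ∃ x ∈ xs, ∃ y ∈ PySem.List.pyRange (-1) 2 1, CellP grid row col w n x y t := by
  intro xs
  induction xs with
  | nil => intro s t; simp
  | cons x xs ih =>
    intro s t
    simp only [List.foldl_cons]
    rw [ih, mem_foldl_inner]
    simp only [List.mem_cons, exists_eq_or_imp]
    exact or_assoc

-- the two main characterizations
theorem mem_slices (grid : List String) (row col : Int) (t : Int × Int × Int) :
    t ∈ (PySem.List.pyRange (-1) 2 1).foldl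
      (fun s x => (PySem.List.pyRange (-1) 2 1).foldl
        (fun s y => cellStep grid row col ((grid.headD "").toList.length) (grid.length) s x y) s)
      PySem.Set.empty ↔ Sel grid row col t := by
  rw [mem_foldl_outer]
  have hm : ∀ r : Int, ((rowT grid r).length : Int) =
      min ((grid.headD "").toList.length : Int) ((rowS grid r).length : Int) := by
    intro r
    rw [rowT, List.length_take]
    exact_mod_cast Nat.cast_min _ _
  constructor
  · rintro (h | ⟨x, hx, y, hy, h1, h2, h3, h4, h5, rfl⟩)
    · exact absurd h (List.not_mem_nil)
    · rw [PySem.List.mem_pyRange_one] at hx hy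
      have hyL : y + col < ((rowS grid (x + row)).length : Int) := digC_lt _ _ h3 h5
      have hyM : y + col < ((rowT grid (x + row)).length : Int) := by
        rw [hm]; omega
      have hdT : digC (rowT grid (x + row)) (y + col) = true := by
        rw [rowT, digC_take _ _ _ h3 (by rw [← rowT]; exact hyM)]; exact h5
      have hL := expandL_spec (rowT grid (x + row)) (y + col).toNat (y + col) h3 hdT (le_refl _)
      have hR := expandR_spec (rowT grid (x + row)) ((rowT grid (x + row)).length : Int)
        rfl (((grid.headD "").toList.length : Int) - (y + col)).toNat (y + col) h3 hdT (by rw [hm]; omega)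
      rw [show expandL (rowS grid (x + row)) (y + col).toNat (y + col)
            = expandL (rowT grid (x + row)) (y + col).toNat (y + col) from by
          rw [rowT, expandL_take _ _ _ _ h3 (by rw [← rowT]; exact hyM)],
        show expandR (rowS grid (x + row)) ((grid.headD "").toList.length : Int)
            (((grid.headD "").toList.length : Int) - (y + col)).toNat (y + col)
            = expandR (rowT grid (x + row)) ((rowT grid (x + row)).length : Int)
            (((grid.headD "").toList.length : Int) - (y + col)).toNat (y + col) from by
          rw [rowT, expandR_take _ _ _ _ h3]]
      refine ⟨x + row, _, _, rfl, h1, h2, by omega, by omega,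
        ⟨hL.1, le_trans hL.2.1 hR.1, hR.2.1, ?_, hL.2.2.2, hR.2.2.2⟩, by omega, ?_⟩
      · intro i hi1 hi2
        by_cases hiy : i ≤ y + col
        · exact hL.2.2.1 i hi1 hiy
        · exact hR.2.2.1 i (by omega) hi2
      · have := hR.1; omega
  · rintro ⟨r, l, e, rfl, hr0, hrn, hr1, hr2, hrun, hsel1, hsel2⟩
    obtain ⟨hl0, hle, hew, hdig, hstart, hend⟩ := hrun
    have hcl : l ≤ max l (col - 1) := le_max_left _ _
    have hce : max l (col - 1) ≤ e := by omega
    have hdc : digC (rowT grid r) (max l (col - 1)) = true := hdig _ hcl hce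
    refine Or.inr ⟨r - row, by rw [PySem.List.mem_pyRange_one]; omega,
      (max l (col - 1)) - col, by rw [PySem.List.mem_pyRange_one]; omega, ?_⟩
    simp only [CellP]
    have e1 : r - row + row = r := by omega
    have e2 : max l (col - 1) - col + col = max l (col - 1) := by omega
    rw [e1, e2]
    set c := max l (col - 1) with hc
    have h0c : 0 ≤ c := by omega
    have hcm : c < ((rowT grid r).length : Int) := by omega
    have hcw : c < ((grid.headD "").toList.length : Int) := by
      have := hm r; omega
    have hdS : digC (rowS grid r) c = true := by
      rw [← digC_take _ ((grid.headD "").toList.length) _ h0c (by rw [← rowT]; exact hcm), ← rowT]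
      exact hdc
    refine ⟨hr0, hrn, h0c, hcw, hdS, ?_⟩
    rw [show expandL (rowS grid r) c.toNat c = expandL (rowT grid r) c.toNat c from by
        rw [rowT, expandL_take _ _ _ _ h0c (by rw [← rowT]; exact hcm)],
      show expandR (rowS grid r) ((grid.headD "").toList.length : Int)
          (((grid.headD "").toList.length : Int) - c).toNat c
          = expandR (rowT grid r) ((rowT grid r).length : Int)
          (((grid.headD "").toList.length : Int) - c).toNat c from by
        rw [rowT, expandR_take _ _ _ _ h0c]]
    have hL := expandL_spec (rowT grid r) c.toNat c h0c hdc (le_refl _)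
    have hR := expandR_spec (rowT grid r) ((rowT grid r).length : Int) rfl
      (((grid.headD "").toList.length : Int) - c).toNat c h0c hdc (by have := hm r; omega)
    have hrun2 : IsRun (rowT grid r) ((rowT grid r).length : Int)
        (expandL (rowT grid r) c.toNat c)
        (expandR (rowT grid r) ((rowT grid r).length : Int)
          (((grid.headD "").toList.length : Int) - c).toNat c) := by
      refine ⟨hL.1, le_trans hL.2.1 hR.1, hR.2.1, ?_, hL.2.2.2, hR.2.2.2⟩
      intro i hi1 hi2
      by_cases hiy : i ≤ c
      · exact hL.2.2.1 i hi1 hiy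
      · exact hR.2.2.1 i (by omega) hi2
    obtain ⟨g1, g2⟩ := run_unique (rowT grid r) ((rowT grid r).length : Int)
      l e _ _ c ⟨hl0, hle, hew, hdig, hstart, hend⟩ hrun2 hcl hce hL.2.1 hR.1
    rw [g1, g2]

theorem mem_spans (grid : List String) (row col : Int) (t : Int × Int × Int) :
    t ∈ (PySem.List.pyRange (max 0 (row - 1)) (min (grid.length : Int) (row + 2)) 1).foldl
      (fun acc r => acc ++ scanRow (rowT grid r) ((rowT grid r).length : Int) col r
        ((rowT grid r).length + 1) 0) [] ↔ Sel grid row col t := by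
  rw [PySem.List.foldl_append_eq_flatMap]
  simp only [List.nil_append, List.mem_flatMap]
  constructor
  · rintro ⟨r, hrmem, ht⟩
    rw [PySem.List.mem_pyRange_one] at hrmem
    obtain ⟨l, e, rfl, hrun, -, h1, h2⟩ :=
      (scanRow_mem (rowT grid r) ((rowT grid r).length : Int) col r rfl
        ((rowT grid r).length + 1) 0 (by omega) (le_refl 0)
        (fun _ => Or.inl rfl) t).mp ht
    exact ⟨r, l, e, rfl, by omega, by omega, by omega, by omega, hrun, h1, h2⟩
  · rintro ⟨r, l, e, rfl, hr0, hrn, hr1, hr2, hrun, h1, h2⟩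
    refine ⟨r, by rw [PySem.List.mem_pyRange_one]; omega, ?_⟩
    exact (scanRow_mem (rowT grid r) ((rowT grid r).length : Int) col r rfl
      ((rowT grid r).length + 1) 0 (by omega) (le_refl 0)
      (fun _ => Or.inl rfl) _).mpr ⟨l, e, rfl, hrun, hrun.1, h1, h2⟩

theorem nodup_spans (grid : List String) (row col : Int) :
    ((PySem.List.pyRange (max 0 (row - 1)) (min (grid.length : Int) (row + 2)) 1).foldl
      (fun acc r => acc ++ scanRow (rowT grid r) ((rowT grid r).length : Int) col r
        ((rowT grid r).length + 1) 0) []).Nodup := by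
  rw [PySem.List.foldl_append_eq_flatMap]
  simp only [List.nil_append]
  refine List.nodup_flatMap.mpr ⟨?_, ?_⟩
  · intro r _
    exact (scanRow_pairwise _ _ _ _ _ _).imp (fun h heq => by rw [heq] at h; exact lt_irrefl _ h)
  · refine (PySem.List.pairwise_lt_pyRange_one _ _).imp ?_
    intro r r' hlt a ha ha'
    have h1 := scanRow_fst _ _ _ _ _ _ a ha
    have h2 := scanRow_fst _ _ _ _ _ _ a ha'
    omega

theorem nodup_slices (grid : List String) (row col : Int) :
    ((PySem.List.pyRange (-1) 2 1).foldl
      (fun s x => (PySem.List.pyRange (-1) 2 1).foldl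
        (fun s y => cellStep grid row col ((grid.headD "").toList.length) (grid.length) s x y) s)
      PySem.Set.empty).Nodup := by
  have inner : ∀ (ys : List Int) (s : PySem.Set (Int × Int × Int)) (x : Int), s.Nodup →
      (ys.foldl (fun s y => cellStep grid row col ((grid.headD "").toList.length) (grid.length) s x y) s).Nodup := by
    intro ys
    induction ys with
    | nil => intro s x h; exact h
    | cons y ys ih => intro s x h; exact ih _ x (nodup_cellStep _ _ _ _ _ _ _ _ h)
  have outer : ∀ (xs : List Int) (s : PySem.Set (Int × Int × Int)), s.Nodup →
      (xs.foldl (fun s x => (PySem.List.pyRange (-1) 2 1).foldl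
        (fun s y => cellStep grid row col ((grid.headD "").toList.length) (grid.length) s x y) s) s).Nodup := by
    intro xs
    induction xs with
    | nil => intro s h; exact h
    | cons x xs ih => intro s h; exact ih _ (inner _ s x h)
  exact outer _ _ List.nodup_nil

-- the common tail: a set/list holding the same two spans yields the same product
theorem outcome (g : List String) (L1 L2 : List (Int × Int × Int)) :
    L2.Perm L1 → L2.Nodup →
    (if PySem.Set.len L1 = 2 then
      match L1 with
      | t1 :: t2 :: _ => intVal g t1 * intVal g t2
      | _ => 0
    else 0)
    = (if L2.length = 2 then
      L2.foldl (fun product t => product * intVal g t) 1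
    else 0) := by
  intro hperm hnd
  have hl : PySem.Set.len L1 = (L1.length : Int) := rfl
  have hlen := hperm.length_eq
  rw [hl]
  by_cases h2 : L2.length = 2
  · rw [if_pos (by omega), if_pos h2]
    obtain ⟨a, b, rfl⟩ := List.length_eq_two.mp (by omega : L1.length = 2)
    obtain ⟨p, q, rfl⟩ := List.length_eq_two.mp h2
    show intVal g a * intVal g b = (1 * intVal g p) * intVal g q
    have hp : p ∈ [a, b] := hperm.subset List.mem_cons_self
    have hq : q ∈ [a, b] := hperm.subset (by simp)
    have hpq : p ≠ q := by
      intro h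
      rw [h] at hnd
      simp at hnd
    rcases List.mem_pair.mp hp with rfl | rfl <;> rcases List.mem_pair.mp hq with rfl | rfl
    · exact absurd rfl hpq
    · rw [one_mul]
    · rw [one_mul, mul_comm]
    · exact absurd rfl hpq
  · rw [if_neg (by omega), if_neg h2]

-- ===== VERDICT (by name: the statement is the Claim_ definition above) =====
theorem find_two_spec : Claim_equal_find_two := by
  intro grid row col _hdom _hpre
  show find_two grid row col = find_two_alt grid row col
  have hA := mem_slices grid row col
  have hB := mem_spans grid row col
  have hperm := (List.perm_ext_iff_of_nodup (nodup_spans grid row col)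
    (nodup_slices grid row col)).mpr (fun t => (hB t).trans (hA t).symm)
  by_cases hg : grid = []
  · subst hg
    have hempty : (PySem.List.pyRange (-1) 2 1).foldl
        (fun s x => (PySem.List.pyRange (-1) 2 1).foldl
          (fun s y => cellStep [] row col ((([] : List String).headD "").toList.length)
            (([] : List String).length) s x y) s) PySem.Set.empty = [] := by
      refine List.eq_nil_iff_forall_not_mem.mpr (fun t ht => ?_)
      obtain ⟨r, l, e, -, hr0, hrn, -⟩ := (hA t).mp ht
      simp at hrn
      omega
    show (if PySem.Set.len _ = 2 then _ else 0) = 0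
    rw [hempty]
    rfl
  · simp only [find_two, find_two_alt, if_neg hg, lineB_eq]
    exact outcome grid _ _ hperm (nodup_spans grid row col)
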